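-- pv_equiv track=rewrite | github.com/drewancameron/DiachronicSenseChange | blood-meridian-translation/scripts/grew_check.py | _morpheus_consensus
-- ===== SOURCE A (Python) =====
-- _MORPHEUS_TO_UD_GENDER = {"masculine": "Masc", "feminine": "Fem", "neuter": "Neut"}
--
-- _MORPHEUS_TO_UD_CASE = {
--     "nominative": "Nom", "genitive": "Gen", "dative": "Dat",
--     "accusative": "Acc", "vocative": "Voc",
-- }
--
-- _MORPHEUS_TO_UD_NUMBER = {"singular": "Sing", "plural": "Plur", "dual": "Dual"}
--
-- def _morpheus_consensus(analyses: list[dict], feat: str) -> str | None: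
--     """Get the consensus value for a morphological feature from Morpheus.
--     Returns the value only if ALL analyses agree (no ambiguity)."""
--     mapping = {
--         "gender": _MORPHEUS_TO_UD_GENDER,
--         "case": _MORPHEUS_TO_UD_CASE,
--         "number": _MORPHEUS_TO_UD_NUMBER,
--     }
--     converter = mapping.get(feat, {})
--
--     values = set()
--     for a in analyses:
--         raw = a.get(feat, "")
--         if raw:
--             values.add(converter.get(raw, raw))
--
--     if len(values) == 1:
--         return values.pop()
--     return None  # ambiguous or missing
-- ===== SOURCE B (Python) =====
-- _MORPHEUS_TO_UD_GENDER = {"masculine": "Masc", "feminine": "Fem", "neuter": "Neut"}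
--
-- _MORPHEUS_TO_UD_CASE = {
--     "nominative": "Nom", "genitive": "Gen", "dative": "Dat",
--     "accusative": "Acc", "vocative": "Voc",
-- }
--
-- _MORPHEUS_TO_UD_NUMBER = {"singular": "Sing", "plural": "Plur", "dual": "Dual"}
--
-- def _morpheus_consensus(analyses: list, feat: str):
--     converter = {
--         "gender": _MORPHEUS_TO_UD_GENDER,
--         "case": _MORPHEUS_TO_UD_CASE,
--         "number": _MORPHEUS_TO_UD_NUMBER,
--     }.get(feat, {})
--     consensus = None
--     for a in analyses:
--         raw = a.get(feat, "")
--         if not raw: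
--             continue
--         val = converter.get(raw, raw)
--         if consensus is None:
--             consensus = val
--         elif val != consensus:
--             return None  # ambiguous: bail out early
--     return consensus
-- ===== Notes on version B (the rewrite author's own statement) =====
-- stated objective: simpler
-- what changed: Replaces the accumulated set plus len==1/pop finish with a single consensus candidate and an early return None on the first disagreement.
import Mathlib
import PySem

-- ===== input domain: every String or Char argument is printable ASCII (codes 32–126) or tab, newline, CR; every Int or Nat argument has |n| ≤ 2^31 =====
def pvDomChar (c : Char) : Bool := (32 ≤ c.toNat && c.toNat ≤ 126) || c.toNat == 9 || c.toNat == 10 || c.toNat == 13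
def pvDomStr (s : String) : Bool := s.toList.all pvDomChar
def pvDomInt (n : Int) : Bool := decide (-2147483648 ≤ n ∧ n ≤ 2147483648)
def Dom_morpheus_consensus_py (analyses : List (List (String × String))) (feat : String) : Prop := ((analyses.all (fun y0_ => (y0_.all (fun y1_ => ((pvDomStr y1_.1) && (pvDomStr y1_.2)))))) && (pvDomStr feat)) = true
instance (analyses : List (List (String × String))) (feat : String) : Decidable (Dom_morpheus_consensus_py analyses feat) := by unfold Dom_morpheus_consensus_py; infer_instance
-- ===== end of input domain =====

-- B replaces A's accumulated set + len==1/pop finish by a single consensus candidate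
-- with an early `none` on the first disagreement (objective: simpler).

-- module-level constant dicts shared by both Pythons
def pvMorpheusGender : PySem.Dict String String :=
  PySem.Dict.ofList [("masculine", "Masc"), ("feminine", "Fem"), ("neuter", "Neut")]
def pvMorpheusCase : PySem.Dict String String :=
  PySem.Dict.ofList [("nominative", "Nom"), ("genitive", "Gen"), ("dative", "Dat"),
   ("accusative", "Acc"), ("vocative", "Voc")]
def pvMorpheusNumber : PySem.Dict String String :=
  PySem.Dict.ofList [("singular", "Sing"), ("plural", "Plur"), ("dual", "Dual")]
def pvMorpheusMapping : PySem.Dict String (PySem.Dict String String) :=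
  PySem.Dict.ofList [("gender", pvMorpheusGender), ("case", pvMorpheusCase), ("number", pvMorpheusNumber)]

-- ===== PORT A =====
def morpheus_consensus_py (analyses : List (List (String × String))) (feat : String) : Option String :=
  let converter := PySem.Dict.getD pvMorpheusMapping feat PySem.Dict.empty
  let values : PySem.Set String :=
    analyses.foldl (fun s a =>
      let raw := PySem.Dict.getD (PySem.Dict.ofList a) feat ""
      if raw ≠ "" then PySem.Set.add s (PySem.Dict.getD converter raw raw) else s)
      PySem.Set.empty
  if values.length = 1 then values.head? else none  -- values.pop() on the singleton set

-- ===== PORT B =====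
def pvAltLoop (converter : PySem.Dict String String) (feat : String) :
    List (List (String × String)) → Option String → Option String
  | [], acc => acc
  | a :: rest, acc =>
    let raw := PySem.Dict.getD (PySem.Dict.ofList a) feat ""
    if raw = "" then pvAltLoop converter feat rest acc
    else
      let val := PySem.Dict.getD converter raw raw
      match acc with
      | none => pvAltLoop converter feat rest (some val)
      | some c => if val ≠ c then none else pvAltLoop converter feat rest acc

def morpheus_consensus_py_alt (analyses : List (List (String × String))) (feat : String) : Option String :=
  let converter := PySem.Dict.getD pvMorpheusMapping feat PySem.Dict.empty
  pvAltLoop converter feat analyses none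

-- ===== PRECONDITION & SPEC =====
def Spec_morpheus_consensus_py (analyses : List (List (String × String))) (feat : String) (out : Option String) : Prop := out = morpheus_consensus_py_alt analyses feat
instance (analyses : List (List (String × String))) (feat : String) (out : Option String) : Decidable (Spec_morpheus_consensus_py analyses feat out) := by unfold Spec_morpheus_consensus_py; infer_instance

-- ===== CLAIM (what is proved, stated in full; the proofs are below) =====
def Claim_equal_morpheus_consensus_py : Prop := ∀ (analyses : List (List (String × String))) (feat : String), Dom_morpheus_consensus_py analyses feat → Spec_morpheus_consensus_py analyses feat (morpheus_consensus_py analyses feat)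

-- ===== LEMMAS AND PROOFS =====

-- the loop body of A's fold
def pvStep (converter : PySem.Dict String String) (feat : String)
    (s : PySem.Set String) (a : List (String × String)) : PySem.Set String :=
  let raw := PySem.Dict.getD (PySem.Dict.ofList a) feat ""
  if raw ≠ "" then PySem.Set.add s (PySem.Dict.getD converter raw raw) else s

-- A's finishing step
def pvFinish (s : PySem.Set String) : Option String :=
  if s.length = 1 then s.head? else none

theorem pv_len_add (s : PySem.Set String) (x : String) :
    s.length ≤ (PySem.Set.add s x).length := by
  simp only [PySem.Set.add]; split <;> simp

theorem pv_fold_len (conv : PySem.Dict String String) (feat : String) :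
    ∀ (rest : List (List (String × String))) (s : PySem.Set String),
      2 ≤ s.length → 2 ≤ (rest.foldl (pvStep conv feat) s).length := by
  intro rest
  induction rest with
  | nil => intro s h; simpa using h
  | cons a rest ih =>
    intro s h
    simp only [List.foldl_cons]
    apply ih
    simp only [pvStep]
    split
    · exact le_trans h (pv_len_add _ _)
    · exact h

theorem pv_loop_some (conv : PySem.Dict String String) (feat : String) :
    ∀ (rest : List (List (String × String))) (c : String),
      pvFinish (rest.foldl (pvStep conv feat) [c]) = pvAltLoop conv feat rest (some c) := by
  intro rest
  induction rest with
  | nil => intro c; simp [pvFinish, pvAltLoop]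
  | cons a rest ih =>
    intro c
    simp only [List.foldl_cons, pvAltLoop]
    by_cases hraw : PySem.Dict.getD (PySem.Dict.ofList a) feat "" = ""
    · simp [pvStep, hraw, ih]
    · simp only [pvStep, ne_eq, hraw]
      by_cases hvc : PySem.Dict.getD conv (PySem.Dict.getD (PySem.Dict.ofList a) feat "") (PySem.Dict.getD (PySem.Dict.ofList a) feat "") = c
      · rw [hvc]
        have hadd : PySem.Set.add [c] c = ([c] : PySem.Set String) := by
          simp [PySem.Set.add, PySem.Set.contains]
        simp [ih c]
      · have hadd : PySem.Set.add [c] (PySem.Dict.getD conv (PySem.Dict.getD (PySem.Dict.ofList a) feat "") (PySem.Dict.getD (PySem.Dict.ofList a) feat ""))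
            = [c, PySem.Dict.getD conv (PySem.Dict.getD (PySem.Dict.ofList a) feat "") (PySem.Dict.getD (PySem.Dict.ofList a) feat "")] := by
          simp only [PySem.Set.add, PySem.Set.contains]
          split
          · rename_i hm
            exact absurd (by simpa using hm) hvc
          · rfl
        have h2 := pv_fold_len conv feat rest [c, PySem.Dict.getD conv (PySem.Dict.getD (PySem.Dict.ofList a) feat "") (PySem.Dict.getD (PySem.Dict.ofList a) feat "")] (by simp)
        have hgoal : pvFinish (List.foldl (pvStep conv feat) [c, PySem.Dict.getD conv (PySem.Dict.getD (PySem.Dict.ofList a) feat "") (PySem.Dict.getD (PySem.Dict.ofList a) feat "")] rest) = none := by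
          unfold pvFinish
          rw [if_neg]
          omega
        simp [hvc, hgoal]

theorem pv_loop_none (conv : PySem.Dict String String) (feat : String) :
    ∀ (rest : List (List (String × String))),
      pvFinish (rest.foldl (pvStep conv feat) []) = pvAltLoop conv feat rest none := by
  intro rest
  induction rest with
  | nil => simp [pvFinish, pvAltLoop]
  | cons a rest ih =>
    simp only [List.foldl_cons, pvAltLoop]
    by_cases hraw : PySem.Dict.getD (PySem.Dict.ofList a) feat "" = ""
    · simp [pvStep, hraw, ih]
    · simp only [pvStep, ne_eq, hraw]
      have hadd : PySem.Set.add PySem.Set.empty (PySem.Dict.getD conv (PySem.Dict.getD (PySem.Dict.ofList a) feat "") (PySem.Dict.getD (PySem.Dict.ofList a) feat ""))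
          = [PySem.Dict.getD conv (PySem.Dict.getD (PySem.Dict.ofList a) feat "") (PySem.Dict.getD (PySem.Dict.ofList a) feat "")] := by
        simp [PySem.Set.add, PySem.Set.contains, PySem.Set.empty]
      simp only [if_false]
      exact pv_loop_some conv feat rest _

-- ===== VERDICT (by name: the statement is the Claim_ definition above) =====
theorem morpheus_consensus_py_spec : Claim_equal_morpheus_consensus_py := by
  intro analyses feat _
  unfold Spec_morpheus_consensus_py morpheus_consensus_py morpheus_consensus_py_alt
  exact pv_loop_none _ _ analyses
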